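-- pv_equiv track=rewrite | github.com/gtxn/auto-correcting-parser | utils.py | reconstruct_blocks
-- ===== SOURCE A (Python) =====
-- def reconstruct_blocks(corrected_blocks):
--   reconstructed_blocks = corrected_blocks
--
--   for indent_num in range(len(corrected_blocks)-2, -1, -1):
--     blocks = reconstructed_blocks[indent_num]
--
--     for block_num, block in enumerate(blocks):
--       total_replacements = 0
--       for token_num, (token, _id, code_pos) in enumerate(block):
--         # Tracks updated token number, incase we have multiple replacements
--         updated_token_num = token_num + total_replacements
--         if token == 'STUB-BLOCK':
--           # Get replacement block for stub
--           replacement = reconstructed_blocks[indent_num+1][-1]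
--           for block_ in reconstructed_blocks[indent_num+1]:
--             if block_[0][1] == _id:
--               replacement = block_
--               continue
--
--           # Perform the replacement
--           blocks[block_num] = blocks[block_num][:updated_token_num] + replacement + blocks[block_num][updated_token_num+1:]
--           # Update length of replacement we made
--           total_replacements += len(replacement)-1
--
--   # Flatten the statements at indent 0
--   reconstructed_code = [
--     x
--     for xs in reconstructed_blocks[0]
--     for x in xs
--   ]
--
--   return reconstructed_code
-- ===== SOURCE B (Python) =====
-- def reconstruct_blocks(corrected_blocks):
--   levels = list(corrected_blocks)
--
--   for indent_num in range(len(levels) - 2, -1, -1):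
--     nxt = levels[indent_num + 1]
--     new_level = []
--     for block in levels[indent_num]:
--       new_block = []
--       for token, _id, code_pos in block:
--         if token == 'STUB-BLOCK':
--           # last block of nxt whose first token id matches, else nxt's last block
--           for cand in reversed(nxt):
--             if cand[0][1] == _id:
--               new_block.extend(cand)
--               break
--           else:
--             new_block.extend(nxt[-1])
--         else:
--           new_block.append((token, _id, code_pos))
--       new_level.append(new_block)
--     levels[indent_num] = new_level
--
--   return [tok for blk in levels[0] for tok in blk]
-- ===== Notes on version B (the rewrite author's own statement) =====
-- stated objective: simpler
-- what changed: Each block is rebuilt by appending tokens / extending with the matching child block (found by a reverse scan with early break) into a fresh list, and the new level is assembled into a fresh structure, instead of A's in-place splice on the live list with total_replacements/updated_token_num offset bookkeeping; B also does not mutate its argument.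
import Mathlib
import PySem

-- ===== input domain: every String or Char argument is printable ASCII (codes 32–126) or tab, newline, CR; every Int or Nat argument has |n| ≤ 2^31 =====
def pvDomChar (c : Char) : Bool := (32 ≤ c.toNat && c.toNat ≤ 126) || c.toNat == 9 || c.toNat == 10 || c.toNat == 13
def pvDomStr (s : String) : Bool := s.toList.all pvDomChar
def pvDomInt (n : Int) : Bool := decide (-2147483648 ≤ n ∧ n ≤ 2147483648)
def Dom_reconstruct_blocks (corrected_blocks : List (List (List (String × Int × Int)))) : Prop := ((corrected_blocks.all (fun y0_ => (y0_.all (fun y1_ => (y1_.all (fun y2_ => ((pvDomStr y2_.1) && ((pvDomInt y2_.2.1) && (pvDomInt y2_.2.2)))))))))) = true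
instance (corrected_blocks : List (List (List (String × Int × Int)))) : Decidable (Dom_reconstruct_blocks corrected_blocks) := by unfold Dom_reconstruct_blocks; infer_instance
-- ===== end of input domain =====

-- B rebuilds each block by appending (reverse scan for the last matching child block) instead of
-- A's in-place splice with offset tracking: simpler, no total_replacements/updated_token_num bookkeeping.
-- NOTE on side effects: Python A mutates corrected_blocks in place; Python B does not mutate its
-- argument — the equivalence proved here is about the RETURN value only.


-- ===== PORT A =====
-- replacement = reconstructed_blocks[indent_num+1][-1]; for block_ in …: if block_[0][1] == _id: replacement = block_
-- (Python raises IndexError on an empty level / empty block_ here; those inputs are outside Pre_,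
--  there the port keeps the accumulator / the [] default instead.)
def pvStepLookupA (id : Int) (acc block_ : List (String × Int × Int)) :
    List (String × Int × Int) :=
  match block_ with
  | [] => acc
  | (_, i, _) :: _ => if i = id then block_ else acc

def pvLookupA (nl : List (List (String × Int × Int))) (id : Int) :
    List (String × Int × Int) :=
  nl.foldl (pvStepLookupA id) (nl.getLast?.getD [])

-- one step of A's inner token loop: state = (blocks[block_num] current value, total_replacements)
def pvStepA (nl : List (List (String × Int × Int)))
    (st : List (String × Int × Int) × Int) (p : Int × (String × Int × Int)) :
    List (String × Int × Int) × Int :=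
  match p with
  | (token_num, (token, id, _)) =>
    if token = "STUB-BLOCK" then
      let utn := token_num + st.2
      let repl := pvLookupA nl id
      (PySem.List.slice st.1 (some 0) (some utn) ++ repl ++
         PySem.List.slice st.1 (some (utn + 1)) none,
       st.2 + ((repl.length : Int) - 1))
    else st

-- for token_num, (token, _id, code_pos) in enumerate(block): … (final value of blocks[block_num]).
-- Python's enumerate is lazy over the mutating list, but only the element being processed is
-- mutated, so each fetched element equals the original one; the eager enumerate here is exact.
def pvBlockA (nl : List (List (String × Int × Int))) (block : List (String × Int × Int)) :
    List (String × Int × Int) :=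
  ((PySem.List.enumerate block 0).foldl (pvStepA nl) (block, 0)).1

def reconstruct_blocks (corrected_blocks : List (List (List (String × Int × Int)))) : List (String × Int × Int) :=
  -- [x for xs in reconstructed_blocks[0] for x in xs]
  (PySem.List.pyGetD ((PySem.List.pyRange ((corrected_blocks.length : Int) - 2) (-1) (-1)).foldl
    (fun levels indent_num =>
      let blocks := PySem.List.pyGetD levels indent_num []
      let nl := PySem.List.pyGetD levels (indent_num + 1) []
      -- for block_num, block in enumerate(blocks): … blocks[block_num] = …
      -- mutating blocks[block_num] mutates the level list stored at levels[indent_num];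
      -- modeled by writing the finished level back at indent_num
      let blocks' := (PySem.List.enumerate blocks 0).foldl
        (fun bs p => PySem.List.pySetD bs p.1 (pvBlockA nl p.2)) blocks
      PySem.List.pySetD levels indent_num blocks')
    corrected_blocks) 0 []).foldl (fun acc xs => acc ++ xs) []

-- ===== PORT B =====
-- for cand in reversed(nxt): if cand[0][1] == _id: … break; else: … nxt[-1]
-- (an empty cand / empty nxt raises in Python; outside Pre_ the port skips / uses [])
def pvIsMatchB (id : Int) (cand : List (String × Int × Int)) : Bool :=
  match cand with
  | (_, i, _) :: _ => i = id
  | [] => false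

def pvLookupB (nl : List (List (String × Int × Int))) (id : Int) :
    List (String × Int × Int) :=
  match nl.reverse.find? (pvIsMatchB id) with
  | some c => c
  | none => nl.getLast?.getD []

def pvRebuildB (nl : List (List (String × Int × Int))) (block : List (String × Int × Int)) :
    List (String × Int × Int) :=
  block.foldl (fun nb t =>
      nb ++ (if t.1 = "STUB-BLOCK" then pvLookupB nl t.2.1 else [t])) []

def reconstruct_blocks_alt (corrected_blocks : List (List (List (String × Int × Int)))) : List (String × Int × Int) :=
  (PySem.List.pyGetD ((PySem.List.pyRange ((corrected_blocks.length : Int) - 2) (-1) (-1)).foldl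
    (fun levels indent_num =>
      let nxt := PySem.List.pyGetD levels (indent_num + 1) []
      let new_level := (PySem.List.pyGetD levels indent_num []).foldl
        (fun acc block => acc ++ [pvRebuildB nxt block]) []
      PySem.List.pySetD levels indent_num new_level)
    corrected_blocks) 0 []).foldl (fun acc xs => acc ++ xs) []

-- ===== PRECONDITION & SPEC =====
-- does this block list contain a 'STUB-BLOCK' token?
def pvHasStub (level : List (List (String × Int × Int))) : Bool :=
  level.any (fun b => b.any (fun t => t.1 == "STUB-BLOCK"))

-- Pre_ excludes exactly the inputs where Python A raises IndexError: an empty corrected_blocks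
-- (reconstructed_blocks[0]), and a level containing a STUB-BLOCK token whose next level is empty
-- ([-1]) or contains an empty block (block_[0]).
def Pre_reconstruct_blocks (corrected_blocks : List (List (List (String × Int × Int)))) : Prop :=
  corrected_blocks ≠ [] ∧
  ∀ i : Nat, i < corrected_blocks.length - 1 →
    pvHasStub (corrected_blocks.getD i []) = true →
      (corrected_blocks.getD (i + 1) [] ≠ [] ∧
       ∀ b ∈ corrected_blocks.getD (i + 1) [], b ≠ [])
instance (corrected_blocks : List (List (List (String × Int × Int)))) : Decidable (Pre_reconstruct_blocks corrected_blocks) := by unfold Pre_reconstruct_blocks; infer_instance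

def pvWitness_reconstruct_blocks : (List (List (List (String × Int × Int)))) :=
  [[[("if", 0, 0), ("STUB-BLOCK", 1, 1)]], [[("pass", 1, 2)]]]

def Spec_reconstruct_blocks (corrected_blocks : List (List (List (String × Int × Int)))) (out : List (String × Int × Int)) : Prop := out = reconstruct_blocks_alt corrected_blocks
instance (corrected_blocks : List (List (List (String × Int × Int)))) (out : List (String × Int × Int)) : Decidable (Spec_reconstruct_blocks corrected_blocks out) := by unfold Spec_reconstruct_blocks; infer_instance

-- ===== CLAIM (what is proved, stated in full; the proofs are below) =====
def Claim_equal_reconstruct_blocks : Prop := ∀ (corrected_blocks : List (List (List (String × Int × Int)))), Dom_reconstruct_blocks corrected_blocks → Pre_reconstruct_blocks corrected_blocks → Spec_reconstruct_blocks corrected_blocks (reconstruct_blocks corrected_blocks)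

-- ===== LEMMAS AND PROOFS =====

-- last-match-with-default forward scan = first match of the reversed list (with the same default)
theorem pv_lookup_aux (id : Int) (nl : List (List (String × Int × Int))) :
    ∀ d, nl.foldl (pvStepLookupA id) d =
      (match nl.reverse.find? (pvIsMatchB id) with
       | some c => c
       | none => d) := by
  induction nl with
  | nil => intro d; simp
  | cons x xs ih =>
    intro d
    simp only [List.foldl_cons, List.reverse_cons, List.find?_append, ih]
    cases h : xs.reverse.find? (pvIsMatchB id) with
    | some c => simp [Option.or]
    | none =>
      simp only [Option.none_or]
      match x with
      | [] => simp [pvStepLookupA, pvIsMatchB]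
      | (a, i, p) :: t =>
        by_cases hi : i = id <;> simp [pvStepLookupA, pvIsMatchB, hi]

theorem pv_lookup_eq (nl : List (List (String × Int × Int))) (id : Int) :
    pvLookupA nl id = pvLookupB nl id := by
  unfold pvLookupA pvLookupB
  exact pv_lookup_aux id nl _

-- A's splice fold over the remaining tokens, under the invariant
-- state = (done ++ rest, done.length - s): it produces done ++ flatMap of B's per-token expansion.
theorem pv_block_inv (nl : List (List (String × Int × Int)))
    (rest : List (String × Int × Int)) :
    ∀ (done : List (String × Int × Int)) (s : Int),
    ((PySem.List.enumerate rest s).foldl (pvStepA nl) (done ++ rest, (done.length : Int) - s)).1 =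
      done ++ rest.flatMap (fun t =>
        if t.1 = "STUB-BLOCK" then pvLookupA nl t.2.1 else [t]) := by
  induction rest with
  | nil => intro done s; simp
  | cons t rest ih =>
    intro done s
    obtain ⟨token, id, pos⟩ := t
    rw [PySem.List.enumerate_cons, List.foldl_cons]
    by_cases hstub : token = "STUB-BLOCK"
    · have hstep : pvStepA nl (done ++ (token, id, pos) :: rest, (done.length : Int) - s)
          (s, (token, id, pos)) =
          ((done ++ pvLookupA nl id) ++ rest,
           (((done ++ pvLookupA nl id).length : Int)) - (s + 1)) := by
        simp only [pvStepA, if_pos hstub]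
        rw [show s + ((done.length : Int) - s) = ((done.length : Nat) : Int) from by omega]
        have ht : (done ++ (token, id, pos) :: rest).take done.length = done := List.take_left
        have hd : (done ++ (token, id, pos) :: rest).drop (done.length + 1) = rest := by
          rw [show done ++ (token, id, pos) :: rest = (done ++ [(token, id, pos)]) ++ rest from by simp,
            show done.length + 1 = (done ++ [(token, id, pos)]).length from by simp]
          exact List.drop_left
        refine Prod.ext ?_ ?_
        · rw [PySem.List.slice_zero_start, PySem.List.slice_to_natCast,
            show ((done.length : Int) + 1) = ((done.length + 1 : Nat) : Int) from by push_cast; ring,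
            PySem.List.slice_from_natCast, ht, hd]
        · simp; omega
      rw [hstep, ih]
      simp [hstub, List.append_assoc]
    · have hstep : pvStepA nl (done ++ (token, id, pos) :: rest, (done.length : Int) - s)
          (s, (token, id, pos)) = (done ++ (token, id, pos) :: rest, (done.length : Int) - s) := by
        simp [pvStepA, hstub]
      rw [hstep,
        show done ++ (token, id, pos) :: rest = (done ++ [(token, id, pos)]) ++ rest from by simp,
        show (done.length : Int) - s = (((done ++ [(token, id, pos)]).length : Int)) - (s + 1) from by
          simp,
        ih]
      simp [hstub, List.append_assoc]

theorem pv_block_eq (nl : List (List (String × Int × Int)))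
    (block : List (String × Int × Int)) :
    pvBlockA nl block = pvRebuildB nl block := by
  unfold pvBlockA pvRebuildB
  have h := pv_block_inv nl block [] 0
  simp only [List.nil_append, List.length_nil, Int.natCast_zero, sub_zero] at h
  rw [h, PySem.List.foldl_append_eq_flatMap
    (fun t : String × Int × Int => if t.1 = "STUB-BLOCK" then pvLookupB nl t.2.1 else [t])]
  simp only [List.nil_append]
  congr 1
  funext t
  rw [pv_lookup_eq]

-- writing f(block) back at each index in turn is mapping f over the level
theorem pv_level_aux (f : List (String × Int × Int) → List (String × Int × Int)) :
    ∀ (xs pre : List (List (String × Int × Int))),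
    (PySem.List.enumerate xs (pre.length : Int)).foldl
        (fun bs p => PySem.List.pySetD bs p.1 (f p.2)) (pre ++ xs) =
      pre ++ xs.map f := by
  intro xs
  induction xs with
  | nil => intro pre; simp
  | cons x xs ih =>
    intro pre
    rw [PySem.List.enumerate_cons, List.foldl_cons]
    have hset : PySem.List.pySetD (pre ++ x :: xs) ((pre.length : Nat) : Int) (f x) =
        (pre ++ [f x]) ++ xs := by
      rw [PySem.List.pySetD_natCast]
      rw [show pre.length = pre.length + 0 from rfl, List.set_append_right _ _ (by omega)]
      simp
    rw [hset,
      show (pre.length : Int) + 1 = (((pre ++ [f x]).length : Nat) : Int) from by simp,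
      ih (pre ++ [f x])]
    simp

theorem pv_level_eq (nl : List (List (String × Int × Int)))
    (blocks : List (List (String × Int × Int))) :
    (PySem.List.enumerate blocks 0).foldl
        (fun bs p => PySem.List.pySetD bs p.1 (pvBlockA nl p.2)) blocks =
      blocks.foldl (fun acc block => acc ++ [pvRebuildB nl block]) [] := by
  have h := pv_level_aux (pvBlockA nl) blocks []
  simp only [List.nil_append, List.length_nil, Int.natCast_zero] at h
  rw [h, PySem.List.foldl_append_singleton_eq_map]
  simp only [List.nil_append]
  exact List.map_congr_left (fun b _ => pv_block_eq nl b)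

theorem reconstruct_blocks_eq (cb : List (List (List (String × Int × Int)))) :
    reconstruct_blocks cb = reconstruct_blocks_alt cb := by
  unfold reconstruct_blocks reconstruct_blocks_alt
  have h : ∀ init : List (List (List (String × Int × Int))),
      (PySem.List.pyRange ((cb.length : Int) - 2) (-1) (-1)).foldl
        (fun levels indent_num =>
          PySem.List.pySetD levels indent_num
            ((PySem.List.enumerate (PySem.List.pyGetD levels indent_num []) 0).foldl
              (fun bs p => PySem.List.pySetD bs p.1
                (pvBlockA (PySem.List.pyGetD levels (indent_num + 1) []) p.2))
              (PySem.List.pyGetD levels indent_num []))) init =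
      (PySem.List.pyRange ((cb.length : Int) - 2) (-1) (-1)).foldl
        (fun levels indent_num =>
          PySem.List.pySetD levels indent_num
            ((PySem.List.pyGetD levels indent_num []).foldl
              (fun acc block => acc ++
                [pvRebuildB (PySem.List.pyGetD levels (indent_num + 1) []) block]) [])) init := by
    intro init
    apply PySem.List.foldl_congr_mem
    intro levels i _
    rw [pv_level_eq]
  exact congrArg (fun r => (PySem.List.pyGetD r 0 []).foldl (fun acc xs => acc ++ xs) []) (h cb)

-- ===== VERDICT (by name: the statement is the Claim_ definition above) =====
theorem reconstruct_blocks_spec : Claim_equal_reconstruct_blocks := by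
  intro cb _ _
  unfold Spec_reconstruct_blocks
  exact reconstruct_blocks_eq cb
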